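-- pv_equiv track=rewrite | github.com/kookmin-sw/capstone-2021-8 | analysis/find-best-keyword.py | get_keyword_info
-- ===== SOURCE A (Python) =====
-- def get_sorted_dict(dict):
--     return sorted(dict.items(), key=lambda x: x[1], reverse=True)
--
-- def get_keyword_info(dict):
--     keyword_info = {}
--     keyword_by_depth = [[], [], [], []]
--     sorted_dict = get_sorted_dict(dict)
--     for keyword, frequency in sorted_dict:
--         if frequency >= 50:
--             keyword_info[keyword] = (0, frequency)
--             keyword_by_depth[0].append(keyword)
--         elif frequency >= 10:
--             keyword_info[keyword] = (1, frequency)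
--             keyword_by_depth[1].append(keyword)
--         elif frequency >= 5:
--             keyword_info[keyword] = (2, frequency)
--             keyword_by_depth[2].append(keyword)
--         else:
--             keyword_info[keyword] = (3, frequency)
--             keyword_by_depth[3].append(keyword)
--     return keyword_info, keyword_by_depth
-- ===== SOURCE B (Python) =====
-- def _depth(f):
--     return (f < 50) + (f < 10) + (f < 5)
--
-- def get_keyword_info(dict):
--     items = sorted(dict.items(), key=lambda x: x[1], reverse=True)
--     keyword_info = {k: (_depth(f), f) for k, f in items}
--     keyword_by_depth = [[k for k, f in items if _depth(f) == d] for d in range(4)]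
--     return keyword_info, keyword_by_depth
-- ===== Notes on version B (the rewrite author's own statement) =====
-- stated objective: alternative
-- what changed: Replaces the single combined loop with if/elif tier branches by a closed-form depth ((f<50)+(f<10)+(f<5)), a dict comprehension for keyword_info, and four separate filtering passes building keyword_by_depth.
import Mathlib
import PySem

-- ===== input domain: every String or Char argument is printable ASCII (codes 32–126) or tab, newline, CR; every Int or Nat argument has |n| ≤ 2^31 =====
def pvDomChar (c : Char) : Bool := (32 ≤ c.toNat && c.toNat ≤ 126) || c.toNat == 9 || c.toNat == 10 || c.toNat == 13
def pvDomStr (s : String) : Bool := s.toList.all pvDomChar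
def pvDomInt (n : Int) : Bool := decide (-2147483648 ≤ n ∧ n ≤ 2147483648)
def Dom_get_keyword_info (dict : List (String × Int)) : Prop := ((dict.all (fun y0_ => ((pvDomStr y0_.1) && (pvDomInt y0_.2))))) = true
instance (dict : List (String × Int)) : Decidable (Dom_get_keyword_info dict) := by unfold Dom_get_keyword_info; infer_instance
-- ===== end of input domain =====

-- B replaces A's single combined if/elif loop with a closed-form depth, a dict
-- comprehension and four filtering passes (alternative decomposition, same cost).

-- ===== PORT A =====
-- helper: get_sorted_dict
def get_sorted_dict (dict : List (String × Int)) : List (String × Int) :=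
  PySem.List.sorted dict (fun x => x.2) true

def get_keyword_info (dict : List (String × Int)) :
    (List (String × Int × Int)) × List (List String) :=
  let sorted_dict := get_sorted_dict dict
  let res := sorted_dict.foldl
    (fun (st : PySem.Dict String (Int × Int) × List String × List String × List String × List String) p =>
      let keyword := p.1
      let frequency := p.2
      if frequency ≥ 50 then
        (st.1.insert keyword (0, frequency), st.2.1 ++ [keyword], st.2.2.1, st.2.2.2.1, st.2.2.2.2)
      else if frequency ≥ 10 then
        (st.1.insert keyword (1, frequency), st.2.1, st.2.2.1 ++ [keyword], st.2.2.2.1, st.2.2.2.2)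
      else if frequency ≥ 5 then
        (st.1.insert keyword (2, frequency), st.2.1, st.2.2.1, st.2.2.2.1 ++ [keyword], st.2.2.2.2)
      else
        (st.1.insert keyword (3, frequency), st.2.1, st.2.2.1, st.2.2.2.1, st.2.2.2.2 ++ [keyword]))
    (PySem.Dict.empty, [], [], [], [])
  (res.1.items, [res.2.1, res.2.2.1, res.2.2.2.1, res.2.2.2.2])

-- ===== PORT B =====
-- helper: _depth(f) = (f<50)+(f<10)+(f<5)
def pvDepth (f : Int) : Int :=
  (if f < 50 then 1 else 0) + (if f < 10 then 1 else 0) + (if f < 5 then 1 else 0)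

def get_keyword_info_alt (dict : List (String × Int)) :
    (List (String × Int × Int)) × List (List String) :=
  let items := PySem.List.sorted dict (fun x => x.2) true
  let keyword_info := items.foldl
    (fun (d : PySem.Dict String (Int × Int)) p => d.insert p.1 (pvDepth p.2, p.2))
    PySem.Dict.empty
  let keyword_by_depth := (PySem.List.pyRange 0 4 1).map
    (fun d => (items.filter (fun p => pvDepth p.2 == d)).map (·.1))
  (keyword_info.items, keyword_by_depth)

-- ===== PRECONDITION & SPEC =====
def Spec_get_keyword_info (dict : List (String × Int)) (out : (List (String × Int × Int)) × List (List String)) : Prop := out = get_keyword_info_alt dict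
instance (dict : List (String × Int)) (out : (List (String × Int × Int)) × List (List String)) : Decidable (Spec_get_keyword_info dict out) := by unfold Spec_get_keyword_info; infer_instance

-- ===== CLAIM (what is proved, stated in full; the proofs are below) =====
def Claim_equal_get_keyword_info : Prop := ∀ (dict : List (String × Int)), Dom_get_keyword_info dict → Spec_get_keyword_info dict (get_keyword_info dict)

-- ===== LEMMAS AND PROOFS =====

-- the bucket B builds for depth i, from list s
def pvBucket (s : List (String × Int)) (i : Int) : List String :=
  (s.filter (fun p => pvDepth p.2 == i)).map (·.1)

-- the invariant: A's fold from any accumulator state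
theorem pv_fold_eq (s : List (String × Int))
    (d : PySem.Dict String (Int × Int)) (b0 b1 b2 b3 : List String) :
    s.foldl
      (fun (st : PySem.Dict String (Int × Int) × List String × List String × List String × List String) p =>
        let keyword := p.1
        let frequency := p.2
        if frequency ≥ 50 then
          (st.1.insert keyword (0, frequency), st.2.1 ++ [keyword], st.2.2.1, st.2.2.2.1, st.2.2.2.2)
        else if frequency ≥ 10 then
          (st.1.insert keyword (1, frequency), st.2.1, st.2.2.1 ++ [keyword], st.2.2.2.1, st.2.2.2.2)
        else if frequency ≥ 5 then
          (st.1.insert keyword (2, frequency), st.2.1, st.2.2.1, st.2.2.2.1 ++ [keyword], st.2.2.2.2)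
        else
          (st.1.insert keyword (3, frequency), st.2.1, st.2.2.1, st.2.2.2.1, st.2.2.2.2 ++ [keyword]))
      (d, b0, b1, b2, b3)
    = (s.foldl (fun (d : PySem.Dict String (Int × Int)) p => d.insert p.1 (pvDepth p.2, p.2)) d,
       b0 ++ pvBucket s 0, b1 ++ pvBucket s 1, b2 ++ pvBucket s 2, b3 ++ pvBucket s 3) := by
  induction s generalizing d b0 b1 b2 b3 with
  | nil => simp [pvBucket]
  | cons p t ih =>
    obtain ⟨k, f⟩ := p
    simp only [List.foldl_cons]
    by_cases h50 : f ≥ 50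
    · have hd : pvDepth f = 0 := by simp [pvDepth]; omega
      simp only [h50, if_pos]
      rw [ih]
      simp [pvBucket, hd]
    · by_cases h10 : f ≥ 10
      · have hd : pvDepth f = 1 := by simp only [pvDepth]; split_ifs <;> omega
        simp only [h50, h10, if_pos, ite_false]
        rw [ih]
        simp [pvBucket, hd]
      · by_cases h5 : f ≥ 5
        · have hd : pvDepth f = 2 := by simp only [pvDepth]; split_ifs <;> omega
          simp only [h50, h10, h5, ite_false, if_pos]
          rw [ih]
          simp [pvBucket, hd]
        · have hd : pvDepth f = 3 := by simp only [pvDepth]; split_ifs <;> omega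
          simp only [h50, h10, h5, ite_false]
          rw [ih]
          simp [pvBucket, hd]

theorem pv_pyRange04 : PySem.List.pyRange 0 4 1 = [0, 1, 2, 3] := by decide

-- ===== VERDICT (by name: the statement is the Claim_ definition above) =====
theorem get_keyword_info_spec : Claim_equal_get_keyword_info := by
  intro dict _
  unfold Spec_get_keyword_info get_keyword_info get_keyword_info_alt get_sorted_dict
  simp only [pv_fold_eq, pv_pyRange04, List.map_cons, List.map_nil, List.nil_append]
  rfl
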